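-- pv_equiv track=rewrite | github.com/colinjansen/advent_of_code | 2024/python/day20.py | get_all_points_in_range
-- ===== SOURCE A (Python) =====
-- def get_all_points_in_range(r):
--     discard = [(1, 0), (-1, 0), (0, 1), (0, -1), (0, 0), (1, 1), (1, -1), (-1, 1), (-1, -1)]
--     points = []
--     for dr in range(-r, r+1):
--         for dc in range(-r, r+1):
--             if abs(dr) + abs(dc) <= r and (dr, dc) not in discard:
--                 points.append((dr, dc, abs(dr) + abs(dc)))
--     return points
-- ===== SOURCE B (Python) =====
-- def get_all_points_in_range(r):
--     points = []
--     for dr in range(-r, r + 1):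
--         m = abs(dr)
--         for dc in range(-(r - m), r - m + 1):
--             if m > 1 or abs(dc) > 1:
--                 points.append((dr, dc, m + abs(dc)))
--     return points
-- ===== Notes on version B (the rewrite author's own statement) =====
-- stated objective: alternative
-- what changed: B generates the Manhattan diamond directly (inner dc range bounded by r-|dr|) instead of scanning the full (2r+1)^2 square and filtering by distance, and replaces the 9-element discard membership test by the equivalent check |dr|>1 or |dc|>1.
import Mathlib
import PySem

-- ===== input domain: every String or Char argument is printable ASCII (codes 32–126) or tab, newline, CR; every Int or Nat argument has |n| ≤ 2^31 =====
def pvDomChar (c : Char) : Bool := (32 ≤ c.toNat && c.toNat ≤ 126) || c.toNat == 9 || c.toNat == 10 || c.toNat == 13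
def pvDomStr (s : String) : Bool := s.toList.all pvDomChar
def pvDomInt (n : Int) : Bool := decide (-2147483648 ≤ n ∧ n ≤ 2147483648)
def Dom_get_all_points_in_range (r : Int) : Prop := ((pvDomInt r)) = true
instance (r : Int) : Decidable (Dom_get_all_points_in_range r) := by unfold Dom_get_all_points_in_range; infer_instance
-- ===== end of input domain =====

-- B generates the Manhattan diamond directly (inner range bounded by r-|dr|) instead of
-- scanning the full (2r+1)² square and filtering; the 9 discarded neighbours become the
-- simple test |dr|>1 ∨ |dc|>1.  Objective: alternative decomposition, same asymptotic cost.

-- ===== PORT A =====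
def get_all_points_in_range (r : Int) : List (Int × Int × Int) :=
  let discard : List (Int × Int) :=
    [(1, 0), (-1, 0), (0, 1), (0, -1), (0, 0), (1, 1), (1, -1), (-1, 1), (-1, -1)]
  (PySem.List.pyRange (-r) (r + 1) 1).foldl (fun points dr =>
    (PySem.List.pyRange (-r) (r + 1) 1).foldl (fun points dc =>
      if |dr| + |dc| ≤ r ∧ (dr, dc) ∉ discard then
        points ++ [(dr, dc, |dr| + |dc|)]
      else points) points) []

-- ===== PORT B =====
def get_all_points_in_range_alt (r : Int) : List (Int × Int × Int) :=
  (PySem.List.pyRange (-r) (r + 1) 1).foldl (fun points dr =>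
    let m := |dr|
    (PySem.List.pyRange (-(r - m)) (r - m + 1) 1).foldl (fun points dc =>
      if 1 < m ∨ 1 < |dc| then
        points ++ [(dr, dc, m + |dc|)]
      else points) points) []

-- ===== PRECONDITION & SPEC =====
def Spec_get_all_points_in_range (r : Int) (out : List (Int × Int × Int)) : Prop := out = get_all_points_in_range_alt r
instance (r : Int) (out : List (Int × Int × Int)) : Decidable (Spec_get_all_points_in_range r out) := by unfold Spec_get_all_points_in_range; infer_instance

-- ===== CLAIM (what is proved, stated in full; the proofs are below) =====
def Claim_equal_get_all_points_in_range : Prop := ∀ (r : Int), Dom_get_all_points_in_range r → Spec_get_all_points_in_range r (get_all_points_in_range r)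

-- ===== LEMMAS AND PROOFS =====

-- A's inner pass over the full row, filtered by the Manhattan bound and the discard list,
-- visits exactly B's diamond row filtered by the neighbour test.
theorem pv_inner_row (r dr : Int) (h : -r ≤ dr) (h' : dr < r + 1) :
    (PySem.List.pyRange (-r) (r + 1) 1).filter
      (fun dc => decide (|dr| + |dc| ≤ r ∧ (dr, dc) ∉
        ([(1, 0), (-1, 0), (0, 1), (0, -1), (0, 0), (1, 1), (1, -1), (-1, 1), (-1, -1)] : List (Int × Int))))
    = (PySem.List.pyRange (-(r - |dr|)) (r - |dr| + 1) 1).filter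
      (fun dc => decide (1 < |dr| ∨ 1 < |dc|)) := by
  have hm : |dr| ≤ r := abs_le.mpr ⟨h, by omega⟩
  have h0 : (0 : Int) ≤ |dr| := abs_nonneg dr
  have hsplit : PySem.List.pyRange (-r) (r + 1) 1
      = PySem.List.pyRange (-r) (-(r - |dr|)) 1
        ++ PySem.List.pyRange (-(r - |dr|)) (r - |dr| + 1) 1
        ++ PySem.List.pyRange (r - |dr| + 1) (r + 1) 1 := by
    rw [PySem.List.pyRange_one_append (-r) (-(r - |dr|)) (r + 1) (by omega) (by omega),
        PySem.List.pyRange_one_append (-(r - |dr|)) (r - |dr| + 1) (r + 1) (by omega) (by omega),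
        List.append_assoc]
  rw [hsplit, List.filter_append, List.filter_append]
  have habs : ∀ dc : Int, (dr, dc) ∈
      ([(1, 0), (-1, 0), (0, 1), (0, -1), (0, 0), (1, 1), (1, -1), (-1, 1), (-1, -1)] : List (Int × Int))
      ↔ |dr| ≤ 1 ∧ |dc| ≤ 1 := by
    intro dc
    have h1 : (0:Int) ≤ |dc| := abs_nonneg dc
    have h2 : dc ≤ |dc| := le_abs_self dc
    have h3 : -dc ≤ |dc| := neg_le_abs dc
    have h4 : dr ≤ |dr| := le_abs_self dr
    have h5 : -dr ≤ |dr| := neg_le_abs dr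
    have h6 : |dc| = dc ∨ |dc| = -dc := abs_choice dc
    have h7 : |dr| = dr ∨ |dr| = -dr := abs_choice dr
    simp only [List.mem_cons, List.not_mem_nil, or_false, Prod.mk.injEq]
    omega
  have hleft : (PySem.List.pyRange (-r) (-(r - |dr|)) 1).filter
      (fun dc => decide (|dr| + |dc| ≤ r ∧ (dr, dc) ∉
        ([(1, 0), (-1, 0), (0, 1), (0, -1), (0, 0), (1, 1), (1, -1), (-1, 1), (-1, -1)] : List (Int × Int)))) = [] := by
    rw [List.filter_eq_nil_iff]
    intro dc hdc
    rw [PySem.List.mem_pyRange_one] at hdc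
    simp only [decide_eq_true_eq, not_and]
    intro hle
    exact absurd hle (by cases abs_cases dc <;> omega)
  have hright : (PySem.List.pyRange (r - |dr| + 1) (r + 1) 1).filter
      (fun dc => decide (|dr| + |dc| ≤ r ∧ (dr, dc) ∉
        ([(1, 0), (-1, 0), (0, 1), (0, -1), (0, 0), (1, 1), (1, -1), (-1, 1), (-1, -1)] : List (Int × Int)))) = [] := by
    rw [List.filter_eq_nil_iff]
    intro dc hdc
    rw [PySem.List.mem_pyRange_one] at hdc
    simp only [decide_eq_true_eq, not_and]
    intro hle
    exact absurd hle (by cases abs_cases dc <;> omega)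
  rw [hleft, hright, List.nil_append, List.append_nil]
  apply List.filter_congr
  intro dc hdc
  rw [PySem.List.mem_pyRange_one] at hdc
  have hdcle : |dc| ≤ r - |dr| := abs_le.mpr ⟨by omega, by omega⟩
  simp only [decide_eq_decide, habs]
  constructor
  · rintro ⟨_, hnot⟩; by_contra hc; push Not at hc; exact hnot ⟨by omega, by omega⟩
  · rintro hgt; exact ⟨by omega, fun ⟨h1, h2⟩ => by omega⟩

-- ===== VERDICT (by name: the statement is the Claim_ definition above) =====
theorem get_all_points_in_range_spec : Claim_equal_get_all_points_in_range := by
  intro r _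
  unfold Spec_get_all_points_in_range get_all_points_in_range get_all_points_in_range_alt
  simp only [PySem.List.foldl_append_ite]
  rw [PySem.List.foldl_congr_mem' (g := fun (points : List (Int × Int × Int)) dr =>
    points ++ ((PySem.List.pyRange (-(r - |dr|)) (r - |dr| + 1) 1).filter
      (fun dc => decide (1 < |dr| ∨ 1 < |dc|))).map (fun dc => (dr, dc, |dr| + |dc|)))]
  intro dr hdr points
  rw [PySem.List.mem_pyRange_one] at hdr
  rw [pv_inner_row r dr hdr.1 hdr.2]
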